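-- pv_equiv track=rewrite | github.com/HarryMayne/rule_articulation_faithfulness | src/rules/rules.py | rule_21
-- ===== SOURCE A (Python) =====
-- def rule_21(s: str) -> bool:
--     """
--     Rule 21: The string has balanced square brackets ('[' and ']'), and at least one matched pair
--     of brackets contains at least one decimal digit (0-9) somewhere between the '[' and ']'.
--     Brackets are balanced if no closing ']' appears before a corresponding '[' and the total
--     number of '[' equals the total number of ']'. Nested pairs are allowed.
--
--     Examples:
--     >>> rule_21("Please tag [item 7] before shipment.")
--     True
--     >>> rule_21("Nested sets like [A[2]B] are fine.")
--     True
--     >>> rule_21("We visited [room 12] upstairs.")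
--     True
--     >>> rule_21("He wrote [notes] and left.")
--     False
--     >>> rule_21("Pack the boxes [carefully.")
--     False
--     """
--     stack = []
--     has_digit_inside_any_pair = False
--
--     for i, ch in enumerate(s):
--         if ch == '[':
--             stack.append(i)
--         elif ch == ']':
--             if not stack:
--                 return False  # Unmatched closing bracket
--             start = stack.pop()
--             segment = s[start + 1 : i]
--             if any('0' <= c <= '9' for c in segment):
--                 has_digit_inside_any_pair = True
--
--     return (len(stack) == 0) and has_digit_inside_any_pair
-- ===== SOURCE B (Python) =====
-- def rule_21(s: str) -> bool:
--     # Push the running digit count at each '['; a pair contains a digit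
--     # iff the count grew by the time its ']' arrives.
--     stack = []
--     digits = 0
--     found = False
--     for ch in s:
--         if '0' <= ch <= '9':
--             digits += 1
--         elif ch == '[':
--             stack.append(digits)
--         elif ch == ']':
--             if not stack:
--                 return False
--             if digits > stack.pop():
--                 found = True
--     return not stack and found
-- ===== Notes on version B (the rewrite author's own statement) =====
-- stated objective: alternative
-- what changed: Instead of re-scanning the slice between each matched bracket pair for digits, B keeps a running digit counter and pushes its value at each '[', so each ']' is checked by comparing two counters.
import Mathlib
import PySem

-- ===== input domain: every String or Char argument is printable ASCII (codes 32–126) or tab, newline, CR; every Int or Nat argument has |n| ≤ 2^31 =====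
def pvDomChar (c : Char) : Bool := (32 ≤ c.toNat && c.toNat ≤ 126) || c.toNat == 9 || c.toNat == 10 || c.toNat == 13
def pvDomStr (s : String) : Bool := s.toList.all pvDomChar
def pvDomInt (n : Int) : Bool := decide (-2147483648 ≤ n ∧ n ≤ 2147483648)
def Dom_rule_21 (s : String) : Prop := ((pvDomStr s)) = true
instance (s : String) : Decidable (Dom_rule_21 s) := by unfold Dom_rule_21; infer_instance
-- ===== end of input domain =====

-- B replaces A's per-pair slice-and-scan for digits with a running digit counter pushed at each '['.

-- ===== PORT A =====
-- A's loop: stack of '[' indices; on ']' pop and scan the slice s[start+1:i] for a digit; early return false on unmatched ']'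
def rule21LoopA (cs : List Char) (rest : List Char) (i : Nat) (stack : List Nat) (flag : Bool) : Bool :=
  match rest with
  | [] => (stack.length = 0) && flag
  | ch :: rest' =>
    if ch = '[' then
      rule21LoopA cs rest' (i + 1) (i :: stack) flag
    else if ch = ']' then
      match stack with
      | [] => false
      | start :: stack' =>
        let segment := PySem.List.slice cs (some ((start : Int) + 1)) (some (i : Int))
        rule21LoopA cs rest' (i + 1) stack'
          (if segment.any (fun c => decide ('0' ≤ c) && decide (c ≤ '9')) then true else flag)
    else
      rule21LoopA cs rest' (i + 1) stack flag

def rule_21 (s : String) : Bool := rule21LoopA s.toList s.toList 0 [] false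

-- ===== PORT B =====
-- B's loop: running digit count; stack holds the count seen at each '['; on ']' compare counts
def rule21LoopB (rest : List Char) (stack : List Nat) (digits : Nat) (found : Bool) : Bool :=
  match rest with
  | [] => stack.isEmpty && found
  | ch :: rest' =>
    if decide ('0' ≤ ch) && decide (ch ≤ '9') then
      rule21LoopB rest' stack (digits + 1) found
    else if ch = '[' then
      rule21LoopB rest' (digits :: stack) digits found
    else if ch = ']' then
      match stack with
      | [] => false
      | d :: stack' =>
        rule21LoopB rest' stack' digits (if digits > d then true else found)
    else
      rule21LoopB rest' stack digits found

def rule_21_alt (s : String) : Bool := rule21LoopB s.toList [] 0 false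

-- ===== PRECONDITION & SPEC =====
def Spec_rule_21 (s : String) (out : Bool) : Prop := out = rule_21_alt s
instance (s : String) (out : Bool) : Decidable (Spec_rule_21 s out) := by unfold Spec_rule_21; infer_instance

-- ===== CLAIM (what is proved, stated in full; the proofs are below) =====
def Claim_equal_rule_21 : Prop := ∀ (s : String), Dom_rule_21 s → Spec_rule_21 s (rule_21 s)

-- ===== LEMMAS AND PROOFS =====

def isDig (c : Char) : Bool := decide ('0' ≤ c) && decide (c ≤ '9')

def cntD (l : List Char) : Nat := l.countP isDig

lemma take_split (cs : List Char) (a b : Nat) (hab : a ≤ b) :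
    cs.take b = cs.take a ++ (cs.drop a).take (b - a) := by
  have : b = a + (b - a) := by omega
  conv_lhs => rw [this]
  rw [List.take_add]

lemma any_iff_cnt (a b : Nat) (cs : List Char) (hab : a ≤ b) :
    ((cs.drop a).take (b - a)).any isDig = decide (cntD (cs.take a) < cntD (cs.take b)) := by
  have h2 : cntD (cs.take b) = cntD (cs.take a) + cntD ((cs.drop a).take (b - a)) := by
    rw [take_split cs a b hab]; simp [cntD, List.countP_append]
  by_cases h : ((cs.drop a).take (b - a)).any isDig = true
  · have hp : 0 < cntD ((cs.drop a).take (b - a)) := by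
      rcases List.any_eq_true.mp h with ⟨x, hx, hpx⟩
      exact List.countP_pos_iff.mpr ⟨x, hx, hpx⟩
    rw [h]; symm; rw [decide_eq_true_iff]; omega
  · have hz : cntD ((cs.drop a).take (b - a)) = 0 := by
      rw [cntD, List.countP_eq_zero]
      intro x hx
      exact fun hpx => h (List.any_eq_true.mpr ⟨x, hx, hpx⟩)
    rw [Bool.not_eq_true] at h
    rw [h]; symm; rw [decide_eq_false_iff_not]; omega

lemma step_facts (cs rest' : List Char) (ch : Char) (i : Nat) (h : cs.drop i = ch :: rest') :
    i < cs.length ∧ cs.drop (i+1) = rest' ∧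
    cntD (cs.take (i+1)) = cntD (cs.take i) + (if isDig ch then 1 else 0) := by
  have hlen := congrArg List.length h
  simp at hlen
  have hi : i < cs.length := by omega
  have hch : cs[i] = ch := by
    have : (cs.drop i)[0]'(by rw [h]; simp) = ch := by simp [h]
    simpa using this
  refine ⟨hi, ?_, ?_⟩
  · have : List.drop 1 (cs.drop i) = rest' := by rw [h]; simp
    simpa [List.drop_drop, Nat.add_comm] using this
  · rw [List.take_add_one, List.getElem?_eq_getElem hi, hch]
    cases hd : isDig ch <;> simp [cntD, List.countP_append, hd]

lemma loop_agree (cs : List Char) : ∀ (rest : List Char) (i : Nat) (stA : List Nat) (flag : Bool),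
    cs.drop i = rest →
    (∀ p ∈ stA, p < i) →
    rule21LoopA cs rest i stA flag
      = rule21LoopB rest (stA.map (fun p => cntD (cs.take (p + 1)))) (cntD (cs.take i)) flag := by
  intro rest
  induction rest with
  | nil =>
    intro i stA flag _ _
    cases stA <;> simp [rule21LoopA, rule21LoopB]
  | cons ch rest' ih =>
    intro i stA flag hdrop hin
    obtain ⟨hi, hdrop', hcnt⟩ := step_facts cs rest' ch i hdrop
    have hdB : (decide ('0' ≤ ch) && decide (ch ≤ '9')) = isDig ch := rfl
    by_cases h1 : ch = '['
    · subst h1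
      have hnd : isDig '[' = false := by decide
      rw [hnd, if_neg (by simp)] at hcnt
      simp only [rule21LoopA, rule21LoopB, hdB, hnd, Bool.false_eq_true, if_false, reduceIte]
      have hbnd : ∀ p ∈ i :: stA, p < i + 1 := by
        intro p hp
        rcases List.mem_cons.mp hp with rfl | hp
        · omega
        · exact Nat.lt_succ_of_lt (hin _ hp)
      rw [ih (i+1) (i :: stA) flag hdrop' hbnd]
      simp only [List.map_cons, hcnt, Nat.add_zero]
    · by_cases h2 : ch = ']'
      · subst h2
        have hnd : isDig ']' = false := by decide
        rw [hnd, if_neg (by simp)] at hcnt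
        simp only [rule21LoopA, rule21LoopB, hdB, hnd, Bool.false_eq_true, if_false,
          if_neg (by decide : ¬ (']' = '[')), reduceIte]
        cases stA with
        | nil => simp
        | cons p stA' =>
          have hp : p < i := hin p (by simp)
          have hslice : PySem.List.slice cs (some ((p : Nat) + 1 : Int)) (some (i : Int))
              = (cs.drop (p+1)).take (i - (p+1)) := by
            have : ((p : Nat) + 1 : Int) = ((p + 1 : Nat) : Int) := by push_cast; ring
            rw [this, PySem.List.slice_natCast]
          have hseg :
              (if (PySem.List.slice cs (some ((p : Nat) + 1 : Int)) (some (i : Int))).any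
                    (fun c => decide ('0' ≤ c) && decide (c ≤ '9')) then true else flag)
                = (if cntD (cs.take i) > cntD (cs.take (p + 1)) then true else flag) := by
            rw [hslice,
              show (fun c => decide ('0' ≤ c) && decide (c ≤ '9')) = isDig from rfl,
              any_iff_cnt (p+1) i cs (by omega)]
            by_cases hlt : cntD (cs.take (p+1)) < cntD (cs.take i)
            · rw [decide_eq_true hlt, if_pos rfl, if_pos hlt]
            · rw [decide_eq_false hlt, if_neg (by simp), if_neg hlt]
          simp only [List.map_cons]
          rw [ih (i+1) stA' _ hdrop' (fun q hq => Nat.lt_succ_of_lt (hin q (by simp [hq]))),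
            hcnt, Nat.add_zero, hseg]
      · by_cases hd : isDig ch = true
        · rw [hd, if_pos rfl] at hcnt
          simp only [rule21LoopA, rule21LoopB, hdB, hd, if_neg h1, if_neg h2, if_true]
          rw [ih (i+1) stA flag hdrop' (fun q hq => Nat.lt_succ_of_lt (hin q hq)), hcnt]
        · rw [Bool.not_eq_true] at hd
          rw [hd, if_neg (by simp)] at hcnt
          simp only [rule21LoopA, rule21LoopB, hdB, hd, Bool.false_eq_true, if_false,
            if_neg h1, if_neg h2]
          rw [ih (i+1) stA flag hdrop' (fun q hq => Nat.lt_succ_of_lt (hin q hq)), hcnt,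
            Nat.add_zero]

-- ===== VERDICT (by name: the statement is the Claim_ definition above) =====
theorem rule_21_spec : Claim_equal_rule_21 := by
  intro s _
  unfold Spec_rule_21 rule_21 rule_21_alt
  simpa using loop_agree s.toList s.toList 0 [] false (by simp) (by simp)
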